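-- pv_equiv track=rewrite | github.com/oliviazhouzym/cs486-group-project | userBasedCollabFilter.py | common_users
-- ===== SOURCE A (Python) =====
-- def common_users(user1_data, user2_data):
--     result = []
--     ht = {}
--     for (music, rating) in user1_data.items():
--         ht.setdefault(music, 0)
--         ht[music] += 1
--     for (music, rating) in user2_data.items():
--         ht.setdefault(music, 0)
--         ht[music] += 1
--     for (k, v) in ht.items():
--         if v == 2:
--             result.append(k)
--     return result
-- ===== SOURCE B (Python) =====
-- def common_users(user1_data, user2_data):
--     return [k for k in user1_data if k in user2_data]
-- ===== Notes on version B (the rewrite author's own statement) =====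
-- stated objective: simpler
-- what changed: Replaced A's count-table construction (two populating loops plus a count==2 filter pass) with a single membership pass over user1_data's keys; Pre_ only excludes association lists with duplicate keys, which do not represent Python dicts.
import Mathlib
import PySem

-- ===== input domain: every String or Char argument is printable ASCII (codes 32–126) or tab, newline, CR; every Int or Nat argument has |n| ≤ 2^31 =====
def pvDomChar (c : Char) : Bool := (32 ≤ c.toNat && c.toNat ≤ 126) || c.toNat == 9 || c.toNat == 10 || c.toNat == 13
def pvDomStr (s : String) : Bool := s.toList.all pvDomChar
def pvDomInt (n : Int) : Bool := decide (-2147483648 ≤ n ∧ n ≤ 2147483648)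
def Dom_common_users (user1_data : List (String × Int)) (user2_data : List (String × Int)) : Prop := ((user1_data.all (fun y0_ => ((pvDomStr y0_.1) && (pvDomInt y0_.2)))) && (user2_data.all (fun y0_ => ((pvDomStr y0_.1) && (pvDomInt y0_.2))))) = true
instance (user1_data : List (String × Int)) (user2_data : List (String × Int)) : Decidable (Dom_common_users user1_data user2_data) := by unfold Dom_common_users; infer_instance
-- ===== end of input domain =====

-- B replaces A's count-table (two populating loops plus a count==2 filter pass) with one membership pass over user1's keys.


-- ===== PORT A =====
-- loop body of A's two counting loops: ht.setdefault(music, 0); ht[music] += 1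
def common_users_bump (d : PySem.Dict String Int) (p : String × Int) : PySem.Dict String Int :=
  (PySem.Dict.setdefault d p.1 (0 : Int)).modify p.1 0 (· + 1)

def common_users (user1_data : List (String × Int)) (user2_data : List (String × Int)) : List String :=
  (user2_data.foldl common_users_bump (user1_data.foldl common_users_bump PySem.Dict.empty)).items.foldl
    (fun result p => if p.2 == 2 then result ++ [p.1] else result) []

-- ===== PORT B =====
-- [k for k in user1_data if k in user2_data]  (dict iteration and membership are over keys)
def common_users_alt (user1_data : List (String × Int)) (user2_data : List (String × Int)) : List String :=
  (user1_data.map Prod.fst).filter (fun k => (user2_data.map Prod.fst).contains k)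

-- ===== PRECONDITION & SPEC =====
-- Pre_ excludes association lists with duplicate keys: they do not represent any Python dict (dict arguments always have distinct keys).
def Pre_common_users (user1_data : List (String × Int)) (user2_data : List (String × Int)) : Prop :=
  (user1_data.map Prod.fst).Nodup ∧ (user2_data.map Prod.fst).Nodup
instance (user1_data : List (String × Int)) (user2_data : List (String × Int)) : Decidable (Pre_common_users user1_data user2_data) := by unfold Pre_common_users; infer_instance
def pvWitness_common_users : (List (String × Int)) × (List (String × Int)) :=
  ([("a", 1), ("b", 2)], [("b", 3), ("c", 4)])

def Spec_common_users (user1_data : List (String × Int)) (user2_data : List (String × Int)) (out : List String) : Prop := out = common_users_alt user1_data user2_data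
instance (user1_data : List (String × Int)) (user2_data : List (String × Int)) (out : List String) : Decidable (Spec_common_users user1_data user2_data out) := by unfold Spec_common_users; infer_instance

-- ===== CLAIM (what is proved, stated in full; the proofs are below) =====
def Claim_equal_common_users : Prop := ∀ (user1_data : List (String × Int)) (user2_data : List (String × Int)), Dom_common_users user1_data user2_data → Pre_common_users user1_data user2_data → Spec_common_users user1_data user2_data (common_users user1_data user2_data)

-- ===== LEMMAS AND PROOFS =====

-- 'ht.setdefault(k, 0); ht[k] += 1' is one counting modify step (on a dict with distinct keys)
lemma setdefault_modify_eq_modify (d : PySem.Dict String Int) (k : String) (hnd : d.keys.Nodup) :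
    (PySem.Dict.setdefault d k (0 : Int)).modify k 0 (· + 1) = d.modify k 0 (· + 1) := by
  by_cases h : d.contains k = true
  · rw [PySem.Dict.setdefault_of_contains d 0 h]
  · have h' : d.contains k = false := by simpa using h
    rw [PySem.Dict.setdefault_of_not_contains d 0 h']
    have hkmem : k ∉ d.keys := fun hm =>
      by simp [(PySem.Dict.contains_iff_mem_keys d k).mpr hm] at h'
    have hkeysL : ((d.insert k (0 : Int)).modify k 0 (· + 1)).keys = d.keys ++ [k] := by
      rw [PySem.Dict.keys_modify, PySem.Dict.keys_insert_of_contains _ _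
        (PySem.Dict.contains_insert_self d k 0)]
      exact PySem.Dict.keys_insert_of_not_contains d 0 h'
    have hkeysR : (d.modify k (0 : Int) (· + 1)).keys = d.keys ++ [k] := by
      rw [PySem.Dict.keys_modify]
      exact PySem.Dict.keys_insert_of_not_contains d _ h'
    have hnd2 : (d.keys ++ [k]).Nodup := by
      rw [List.nodup_append]
      refine ⟨hnd, List.nodup_singleton k, ?_⟩
      intro a ha b hb
      rw [List.mem_singleton] at hb
      subst hb
      exact fun hab => hkmem (hab ▸ ha)
    apply PySem.Dict.ext
    rw [PySem.Dict.items_eq_map_keys _ (by rw [hkeysL]; exact hnd2) 0,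
        PySem.Dict.items_eq_map_keys _ (by rw [hkeysR]; exact hnd2) 0, hkeysL, hkeysR]
    apply List.map_congr_left
    intro a _
    by_cases hak : a = k
    · subst hak
      simp [PySem.Dict.getD_of_not_contains d 0 h']
    · simp [PySem.Dict.getD_modify, PySem.Dict.getD_insert, hak]

-- each counting loop of A is the plain Counter loop over the keys
lemma fold_eq (l : List (String × Int)) (d : PySem.Dict String Int) (hnd : d.keys.Nodup) :
    l.foldl common_users_bump d
      = (l.map Prod.fst).foldl (fun d x => d.modify x 0 (· + 1)) d := by
  rw [List.foldl_map]
  induction l generalizing d with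
  | nil => rfl
  | cons p t ih =>
    simp only [List.foldl_cons, common_users_bump]
    rw [setdefault_modify_eq_modify d p.1 hnd]
    exact ih _ (PySem.Dict.nodup_keys_foldl_modify_key [p.1] (fun x => x) 0
      (fun _ _ v => v + 1) d hnd)

-- set-update appends only fresh elements
lemma update_decomp (xs s : List String) :
    ∃ r, PySem.Set.update s xs = s ++ r ∧ ∀ y ∈ r, y ∉ s := by
  induction xs generalizing s with
  | nil => exact ⟨[], by simp [PySem.Set.update_nil], by simp⟩
  | cons x t ih =>
    by_cases hx : x ∈ s
    · rw [PySem.Set.update_cons, PySem.Set.add_of_mem hx]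
      exact ih s
    · rw [PySem.Set.update_cons, PySem.Set.add_of_not_mem hx]
      obtain ⟨r, hr, hout⟩ := ih (s ++ [x])
      refine ⟨x :: r, by simpa using hr, ?_⟩
      intro y hy
      rcases List.mem_cons.mp hy with rfl | hy'
      · exact hx
      · exact fun hmem => hout y hy' (List.mem_append_left _ hmem)

-- set(xs) of a duplicate-free list is the list itself
lemma ofList_eq_self (l : List String) (h : l.Nodup) : PySem.Set.ofList l = l := by
  induction l using List.reverseRecOn with
  | nil => simp [PySem.Set.ofList_nil]
  | append_singleton t x ih =>
    have ht : t.Nodup ∧ ∀ a ∈ t, ¬a = x := by simpa [List.nodup_append] using h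
    rw [PySem.Set.ofList_append_singleton, ih ht.1,
      PySem.Set.add_of_not_mem (fun hm => ht.2 x hm rfl)]

-- the keys counted twice are exactly user1's keys that also occur among user2's keys
lemma filter_counter (k1 k2 : List String) (h1 : k1.Nodup) (h2 : k2.Nodup) :
    (PySem.Set.ofList (k1 ++ k2)).filter (fun k => ((k1 ++ k2).count k : Int) == 2)
      = k1.filter (fun k => k2.contains k) := by
  obtain ⟨r, hr, hout⟩ := update_decomp k2 k1
  have hof : PySem.Set.ofList (k1 ++ k2) = k1 ++ r := by
    rw [PySem.Set.ofList_append, ofList_eq_self k1 h1, hr]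
  rw [hof, List.filter_append]
  have hrnil : r.filter (fun k => ((k1 ++ k2).count k : Int) == 2) = [] := by
    rw [List.filter_eq_nil_iff]
    intro y hy
    have hy1 : y ∉ k1 := hout y hy
    have hy2 : y ∈ k2 := by
      have hmem : y ∈ PySem.Set.update k1 k2 := by
        rw [hr]; exact List.mem_append_right _ hy
      rcases (PySem.Set.mem_update k1 k2 y).mp hmem with h | h
      · exact absurd h hy1
      · exact h
    simp [List.count_append, List.count_eq_zero_of_not_mem hy1,
      List.count_eq_one_of_mem h2 hy2]
  have hk1 : k1.filter (fun k => ((k1 ++ k2).count k : Int) == 2)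
      = k1.filter (fun k => k2.contains k) := by
    apply List.filter_congr
    intro x hx
    by_cases hx2 : x ∈ k2
    · simp [List.count_append, List.count_eq_one_of_mem h1 hx,
        List.count_eq_one_of_mem h2 hx2, hx2]
    · simp [List.count_append, List.count_eq_one_of_mem h1 hx,
        List.count_eq_zero_of_not_mem hx2, hx2]
  rw [hrnil, hk1, List.append_nil]

-- ===== VERDICT (by name: the statement is the Claim_ definition above) =====
theorem common_users_spec : Claim_equal_common_users := by
  intro u1 u2 _ hpre
  obtain ⟨h1, h2⟩ := hpre
  unfold Spec_common_users common_users common_users_alt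
  rw [fold_eq u1 _ PySem.Dict.nodup_keys_empty]
  rw [fold_eq u2 _ (PySem.Dict.nodup_keys_foldl_modify_key (u1.map Prod.fst) (fun x => x) 0
    (fun _ _ v => v + 1) PySem.Dict.empty PySem.Dict.nodup_keys_empty)]
  rw [← List.foldl_append, ← PySem.Dict.counter_eq_foldl, PySem.Dict.items_counter]
  rw [PySem.List.foldl_append_if (fun q => q.2 == 2) Prod.fst]
  rw [List.nil_append, List.filter_map, List.map_map]
  simpa [Function.comp_def] using
    filter_counter (u1.map Prod.fst) (u2.map Prod.fst) h1 h2
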